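-- pv_equiv track=rewrite | github.com/Inc44/Birthday | benchmark.py | filter_commands_pairs
-- ===== SOURCE A (Python) =====
-- from typing import List
--
-- COMPILERS = (
-- 	"gcc",
-- 	"g++",
-- 	"zig",
-- 	"nvcc",
-- 	"go",
-- 	"python",
-- 	"cargo",
-- 	"clang",
-- 	"clang++",
-- 	"csc",
-- 	"mono",
-- 	"javac",
-- 	"java",
-- 	"node",
-- 	"lua",
-- 	"ocamlopt",
-- )
--
-- def filter_commands_pairs(
-- 	reconstructed_commands: List[str],
-- ) -> list[tuple[str | None, str]]:
-- 	commands_pairs = []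
-- 	seen_commands = set()
-- 	for cmd in reconstructed_commands:
-- 		if not cmd:
-- 			continue
-- 		tokens = cmd.split()
-- 		if not tokens or tokens[0] not in COMPILERS:
-- 			continue
-- 		if "&&" in cmd:
-- 			parts = [part.strip() for part in cmd.split("&&") if part.strip()]
-- 			if len(parts) >= 2:
-- 				compile_cmd = " && ".join(parts[:-1])
-- 				run_cmd = parts[-1]
-- 			else:
-- 				compile_cmd = None
-- 				run_cmd = cmd.replace("&&", "").strip()
-- 		else:
-- 			compile_cmd = None
-- 			run_cmd = cmd
-- 		pair_cmd = (compile_cmd, run_cmd)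
-- 		if pair_cmd in seen_commands:
-- 			continue
-- 		seen_commands.add(pair_cmd)
-- 		commands_pairs.append(pair_cmd)
-- 	return commands_pairs
-- ===== SOURCE B (Python) =====
-- from typing import List
--
-- COMPILERS = (
-- 	"gcc",
-- 	"g++",
-- 	"zig",
-- 	"nvcc",
-- 	"go",
-- 	"python",
-- 	"cargo",
-- 	"clang",
-- 	"clang++",
-- 	"csc",
-- 	"mono",
-- 	"javac",
-- 	"java",
-- 	"node",
-- 	"lua",
-- 	"ocamlopt",
-- )
--
-- def _is_command(cmd):
-- 	# "".split() == [], so an empty command fails this test too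
-- 	tokens = cmd.split()
-- 	return bool(tokens) and tokens[0] in COMPILERS
--
-- def _parse_pair(cmd):
-- 	if "&&" in cmd:
-- 		parts = [part.strip() for part in cmd.split("&&") if part.strip()]
-- 		if len(parts) >= 2:
-- 			return (" && ".join(parts[:-1]), parts[-1])
-- 		return (None, cmd.replace("&&", "").strip())
-- 	return (None, cmd)
--
-- def filter_commands_pairs(reconstructed_commands):
-- 	# pass 1: parse every valid command into its pair
-- 	pending = [_parse_pair(cmd) for cmd in reconstructed_commands if _is_command(cmd)]
-- 	# pass 2: dedup by repeatedly emitting the head and deleting its later copies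
-- 	result = []
-- 	while pending:
-- 		head = pending[0]
-- 		result.append(head)
-- 		pending = [p for p in pending[1:] if p != head]
-- 	return result
-- ===== Notes on version B (the rewrite author's own statement) =====
-- stated objective: alternative
-- what changed: Replaces A's single interleaved loop with a mutable seen-set by two separate passes: a parse pass mapping each valid command to its (compile, run) pair, then a dedup pass with no auxiliary set that repeatedly emits the head pair and deletes all of its later occurrences from the pending list.
import Mathlib
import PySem

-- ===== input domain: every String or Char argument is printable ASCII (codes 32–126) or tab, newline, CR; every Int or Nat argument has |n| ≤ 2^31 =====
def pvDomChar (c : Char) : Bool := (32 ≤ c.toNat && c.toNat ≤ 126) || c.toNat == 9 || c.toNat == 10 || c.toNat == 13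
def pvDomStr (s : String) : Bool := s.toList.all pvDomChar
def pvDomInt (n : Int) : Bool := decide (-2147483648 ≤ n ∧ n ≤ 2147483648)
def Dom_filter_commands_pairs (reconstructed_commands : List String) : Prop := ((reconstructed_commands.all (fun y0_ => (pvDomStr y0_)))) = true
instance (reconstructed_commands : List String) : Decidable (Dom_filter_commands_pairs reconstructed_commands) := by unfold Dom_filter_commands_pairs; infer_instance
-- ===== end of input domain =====

-- B replaces A's single loop with a seen-set by two passes: parse all valid commands into
-- pairs, then dedup with no auxiliary set (emit head, delete its later copies); objective: alternative.

-- module constant COMPILERS, shared by both Pythons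
def pvCOMPILERS : List String :=
  ["gcc", "g++", "zig", "nvcc", "go", "python", "cargo", "clang", "clang++",
   "csc", "mono", "javac", "java", "node", "lua", "ocamlopt"]

-- ===== PORT A =====
-- literal transliteration of A: one fold over the commands carrying (commands_pairs, seen_commands)
def filter_commands_pairs (reconstructed_commands : List String) : List (Option String × String) :=
  (reconstructed_commands.foldl
    (fun (st : List (Option String × String) × PySem.Set (Option String × String)) cmd =>
      if cmd = "" then st
      else
        let tokens := PySem.Str.split₀ cmd
        if tokens = [] ∨ ¬ pvCOMPILERS.contains (tokens.headD "") then st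
        else
          let pair_cmd : Option String × String :=
            if PySem.Str.isIn "&&" cmd then
              -- sep "&&" is a non-empty literal, so split? is always `some`: .getD [] is exact
              let parts := (((PySem.Str.split? cmd "&&").getD []).filter
                  (fun part => PySem.Str.strip part ≠ "")).map PySem.Str.strip
              if 2 ≤ parts.length then
                (some (PySem.Str.join " && " (PySem.List.slice parts none (some (-1)))),
                 PySem.List.pyGetD parts (-1) "")
              else
                (none, PySem.Str.strip (PySem.Str.replace cmd "&&" ""))
            else (none, cmd)
          if PySem.Set.contains st.2 pair_cmd then st
          else (st.1 ++ [pair_cmd], PySem.Set.add st.2 pair_cmd))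
    ([], PySem.Set.empty)).1

-- ===== PORT B =====
-- helper _is_command ("".split() = [], so the empty command fails the tokens test)
def pvIsCommand (cmd : String) : Bool :=
  let tokens := PySem.Str.split₀ cmd
  tokens ≠ [] && pvCOMPILERS.contains (tokens.headD "")

-- helper _parse_pair
def pvParsePair (cmd : String) : Option String × String :=
  if PySem.Str.isIn "&&" cmd then
    let parts := (((PySem.Str.split? cmd "&&").getD []).filter
        (fun part => PySem.Str.strip part ≠ "")).map PySem.Str.strip
    if 2 ≤ parts.length then
      (some (PySem.Str.join " && " (PySem.List.slice parts none (some (-1)))),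
       PySem.List.pyGetD parts (-1) "")
    else
      (none, PySem.Str.strip (PySem.Str.replace cmd "&&" ""))
  else (none, cmd)

-- B's while-loop dedup: emit the head, drop all its later occurrences, continue
def pvHeadDedup : List (Option String × String) → List (Option String × String)
  | [] => []
  | head :: pending => head :: pvHeadDedup (pending.filter (fun p => p ≠ head))
termination_by l => l.length
decreasing_by
  simp only [List.length_unattach, List.length_cons, Nat.lt_succ_iff]
  simpa using le_trans (List.length_filter_le _ pending.attach) (by simp)

def filter_commands_pairs_alt (reconstructed_commands : List String) : List (Option String × String) :=
  pvHeadDedup ((reconstructed_commands.filter pvIsCommand).map pvParsePair)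

-- ===== PRECONDITION & SPEC =====
def Spec_filter_commands_pairs (reconstructed_commands : List String) (out : List (Option String × String)) : Prop := out = filter_commands_pairs_alt reconstructed_commands
instance (reconstructed_commands : List String) (out : List (Option String × String)) : Decidable (Spec_filter_commands_pairs reconstructed_commands out) := by unfold Spec_filter_commands_pairs; infer_instance

-- ===== CLAIM (what is proved, stated in full; the proofs are below) =====
def Claim_equal_filter_commands_pairs : Prop := ∀ (reconstructed_commands : List String), Dom_filter_commands_pairs reconstructed_commands → Spec_filter_commands_pairs reconstructed_commands (filter_commands_pairs reconstructed_commands)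

-- ===== LEMMAS AND PROOFS =====

-- a fold over a pair state whose components evolve identically is a fold over one component
lemma pv_pair_foldl {α β : Type} (F : List α × PySem.Set α → β → List α × PySem.Set α)
    (G : PySem.Set α → β → PySem.Set α)
    (h : ∀ s x, F (s, s) x = (G s x, G s x)) :
    ∀ (l : List β) (s : PySem.Set α), (l.foldl F (s, s)).1 = l.foldl G s := by
  intro l
  induction l with
  | nil => intro s; rfl
  | cons c t ih =>
    intro s
    rw [List.foldl_cons, h, List.foldl_cons]
    exact ih _

-- accumulating new elements through Set.add is exactly B's head-dedup of the not-yet-seen elements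
lemma pv_foldl_add_eq_headDedup :
    ∀ (l : List (Option String × String)) (s : List (Option String × String)),
      l.foldl PySem.Set.add s = s ++ pvHeadDedup (l.filter (fun p => ¬ s.contains p)) := by
  intro l
  induction l with
  | nil => intro s; simp [pvHeadDedup.eq_1]
  | cons h t ih =>
    intro s
    rw [List.foldl_cons]
    by_cases hm : h ∈ s
    · rw [PySem.Set.add_of_mem hm, ih]
      congr 2
      simp [List.filter_cons, hm]
    · rw [PySem.Set.add_of_not_mem hm, ih]
      have hfl : (h :: t).filter (fun p => decide (¬ s.contains p)) =
          h :: t.filter (fun p => decide (¬ s.contains p)) := by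
        simp [List.filter_cons, hm]
      have hff : (t.filter (fun p => decide (¬ s.contains p))).filter (fun p => p ≠ h) =
          t.filter (fun p => decide (¬ (s ++ [h]).contains p)) := by
        rw [List.filter_filter]
        apply List.filter_congr
        intro x _
        by_cases hx : x = h <;> by_cases hxs : x ∈ s <;> simp [hx, hxs]
      rw [hfl, pvHeadDedup.eq_2, hff, List.append_assoc]
      rfl

-- ===== VERDICT (by name: the statement is the Claim_ definition above) =====
theorem filter_commands_pairs_spec : Claim_equal_filter_commands_pairs := by
  intro rcs _
  unfold Spec_filter_commands_pairs filter_commands_pairs filter_commands_pairs_alt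
  rw [show (PySem.Set.empty : PySem.Set (Option String × String)) = [] from rfl]
  rw [pv_pair_foldl _
      (fun s cmd => if pvIsCommand cmd then PySem.Set.add s (pvParsePair cmd) else s) ?step]
  · rw [PySem.List.foldl_if_eq_foldl_filter (p := pvIsCommand)
        (f := fun s cmd => PySem.Set.add s (pvParsePair cmd))]
    rw [← List.foldl_map (f := pvParsePair) (g := PySem.Set.add)]
    rw [pv_foldl_add_eq_headDedup]
    simp
  case step =>
    intro s cmd
    by_cases h1 : cmd = ""
    · have hz : PySem.Chars.split₀ ([] : List Char) = [] := rfl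
      simp [pvIsCommand, h1, PySem.Str.split₀, hz]
    · by_cases h2 : PySem.Str.split₀ cmd = []
      · simp [pvIsCommand, h1, h2]
      · by_cases h3 : pvCOMPILERS.contains ((PySem.Str.split₀ cmd).headD "")
        · have h3' : (PySem.Str.split₀ cmd).head?.getD "" ∈ pvCOMPILERS := by
            simpa using h3
          simp only [pvIsCommand, pvParsePair, PySem.Set.add_eq_ite]
          simp [h1, h2, h3']
          repeat' split
          all_goals simp_all
        · have h3' : (PySem.Str.split₀ cmd).head?.getD "" ∉ pvCOMPILERS := by
            simpa using h3
          simp [pvIsCommand, h1, h2, h3']
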